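-- pv_equiv track=rewrite | github.com/miliar/Code_Jam_Webscraper | solutions_python/solutions_year17_round1_nr1/251.py | copy_column
-- ===== SOURCE A (Python) =====
-- DIRECTION_X = {"UP": 0, "DOWN": 0, "LEFT": -1, "RIGHT": 1}
--
-- def can_go(grid, nx, ny):
--     r = len(grid)
--     c = len(grid[0])
--     if nx < 0 or nx >= c or ny < 0 or ny >= r:
--         return False
--     return True
--
-- def copy_column(grid, x, direction):
--     nx = x + DIRECTION_X[direction]
--     if can_go(grid, nx, 0):
--         if grid[0][nx] == '?':
--             if not copy_column(grid, nx, direction):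
--                 return False
--         for y in range(len(grid)):
--             grid[y][x] = grid[y][nx]
--         return True
--     return False
-- ===== SOURCE B (Python) =====
-- DIRECTION_X = {"UP": 0, "DOWN": 0, "LEFT": -1, "RIGHT": 1}
--
-- # Different decomposition: no recursion and no chain walk. The chain of '?'
-- # columns is read off row 0 as ONE slice in the travel direction; the answer is
-- # simply whether that slice contains a known (non-'?') column, and the copy then
-- # writes the base column's value directly into every chained column.
-- def copy_column(grid, x, direction):
--     d = DIRECTION_X[direction]
--     row0 = grid[0]
--     c = len(row0)
--     nx = x + d
--     if not (0 <= nx < c):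
--         return False
--     # the columns the chain would visit, in travel order, as one slice of row 0
--     if d > 0:
--         seg = row0[nx:]
--     elif d < 0:
--         seg = row0[nx::-1]
--     else:
--         seg = row0[nx:nx + 1]
--     k = next((i for i, v in enumerate(seg) if v != '?'), None)
--     if k is None:
--         return False  # every column in that direction is unknown
--     b = nx + k * d  # the base (first known) column; b == nx when d == 0
--     for y in range(len(grid)):
--         v = grid[y][b]
--         cx = x
--         while cx != b:
--             grid[y][cx] = v
--             cx += d
--     return True
-- ===== Notes on version B (the rewrite author's own statement) =====
-- stated objective: alternative
-- what changed: A's recursion through the unknown columns is replaced by reading the whole chain off row 0 as one slice in the travel direction, deciding success by the first known column of that slice, and copying the base column's value directly into every chained column (no recursion, no cascading copies).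
import Mathlib
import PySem

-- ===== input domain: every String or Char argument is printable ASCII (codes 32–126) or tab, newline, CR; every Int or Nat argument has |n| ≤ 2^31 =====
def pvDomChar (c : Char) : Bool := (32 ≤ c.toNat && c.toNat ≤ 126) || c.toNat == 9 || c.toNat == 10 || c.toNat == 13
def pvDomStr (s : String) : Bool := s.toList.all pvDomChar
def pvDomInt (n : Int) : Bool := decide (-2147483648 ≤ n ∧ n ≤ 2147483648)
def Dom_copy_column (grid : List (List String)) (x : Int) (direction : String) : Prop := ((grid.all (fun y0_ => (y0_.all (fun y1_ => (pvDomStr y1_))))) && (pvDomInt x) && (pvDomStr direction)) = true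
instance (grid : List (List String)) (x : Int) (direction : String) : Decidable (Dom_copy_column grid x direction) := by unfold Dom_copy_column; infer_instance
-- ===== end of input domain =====

-- B replaces A's recursion through the '?' columns by reading the whole chain off row 0 as ONE
-- slice and asking for its first known column; both Pythons mutate the grid in place and leave it
-- in the same final state inside Pre_, but the equivalence proved here is about the RETURN value
-- only (the Lean ports return the Bool and omit the in-place copies, which never affect it).

-- ===== PORT A =====
def DIRECTION_X : PySem.Dict String Int :=
  PySem.Dict.ofList [("UP", 0), ("DOWN", 0), ("LEFT", -1), ("RIGHT", 1)]

def can_go (grid : List (List String)) (nx ny : Int) : Bool :=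
  let r : Int := grid.length
  -- len(grid[0]) raises IndexError on an empty grid; Pre_ excludes grid = []
  let c : Int := match PySem.List.pyGet? grid 0 with
                 | some row => row.length
                 | none => 0
  if nx < 0 ∨ nx ≥ c ∨ ny < 0 ∨ ny ≥ r then false else true

-- grid[0][nx] (none = IndexError; A only reads it after can_go succeeded, so it is in range)
def cell0 (grid : List (List String)) (nx : Int) : Option String :=
  (PySem.List.pyGet? grid 0).bind (fun row => PySem.List.pyGet? row nx)

-- A's recursion, with fuel (width + 1) as a totality guard only: inside Pre_ the chain of nx
-- values is strictly monotone inside [0, width), so the fuel is never exhausted.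
def copy_column_aux (grid : List (List String)) (d : Int) : Nat → Int → Bool
  | 0, _ => false
  | fuel + 1, x =>
    let nx := x + d
    if can_go grid nx 0 then
      if cell0 grid nx = some "?" then
        if copy_column_aux grid d fuel nx = false then false
        else true  -- the loop 'for y in range(len(grid))' mutates grid; the Bool is unaffected
      else true
    else false

def copy_column (grid : List (List String)) (x : Int) (direction : String) : Bool :=
  match PySem.Dict.get? DIRECTION_X direction with
  | none => false  -- KeyError in Python; outside Pre_
  | some d => copy_column_aux grid d (((PySem.List.pyGet? grid 0).getD []).length + 1) x

-- ===== PORT B =====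
def copy_column_alt (grid : List (List String)) (x : Int) (direction : String) : Bool :=
  match PySem.Dict.get? DIRECTION_X direction with
  | none => false  -- KeyError in Python; outside Pre_
  | some d =>
    let row0 := grid.headD []  -- grid[0]; the empty grid (IndexError) is outside Pre_
    let c : Int := row0.length
    let nx := x + d
    if 0 ≤ nx ∧ nx < c then
      -- the slices below are hand ports, exact because 0 ≤ nx < c holds here:
      -- row0[nx:] = drop nx, row0[nx::-1] = the first nx+1 elements reversed, row0[nx:nx+1]
      let seg := if d > 0 then row0.drop nx.toNat
                 else if d < 0 then (row0.take (nx.toNat + 1)).reverse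
                 else (row0.drop nx.toNat).take 1
      -- next((i for i, v in enumerate(seg) if v != '?'), None) = first index with v ≠ '?'
      match seg.findIdx? (fun v => v != "?") with
      | none => false   -- every column in that direction is unknown
      | some _ => true  -- the copy loops mutate grid; the Bool is unaffected
    else false

-- ===== PRECONDITION & SPEC =====
-- Pre_ holds exactly where the Python A RETURNS: it excludes only raising inputs — the empty grid
-- and unknown directions (IndexError/KeyError), UP/DOWN on an in-range '?' cell (RecursionError),
-- and inputs whose copy phase would index a row out of bounds (IndexError: a copy happens, i.e.
-- a known base column exists, and some row is too short for the columns read/written).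
def Pre_copy_column (grid : List (List String)) (x : Int) (direction : String) : Prop :=
  grid ≠ [] ∧
  (direction = "UP" ∨ direction = "DOWN" ∨ direction = "LEFT" ∨ direction = "RIGHT") ∧
  (let row0 := grid.headD []
   let c : Int := row0.length
   let d : Int := if direction = "LEFT" then -1 else if direction = "RIGHT" then 1 else 0
   let nx := x + d
   ¬ (0 ≤ nx ∧ nx < c) ∨
   (if d = 0 then
      row0.getD x.toNat "" ≠ "?" ∧ ∀ row ∈ grid, x < (row.length : Int)
    else if d = 1 then
      (∀ v ∈ row0.drop nx.toNat, v = "?") ∨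
      (let b : Int := nx + List.findIdx (fun v => v != "?") (row0.drop nx.toNat)
       ∀ row ∈ grid, b < (row.length : Int) ∧ -(row.length : Int) ≤ x)
    else
      (∀ v ∈ row0.take (nx.toNat + 1), v = "?") ∨ ∀ row ∈ grid, x < (row.length : Int)))
instance (grid : List (List String)) (x : Int) (direction : String) : Decidable (Pre_copy_column grid x direction) := by unfold Pre_copy_column; infer_instance

def pvWitness_copy_column : List (List String) × Int × String :=
  ([["?", "a"], ["x", "y"]], 0, "RIGHT")

def Spec_copy_column (grid : List (List String)) (x : Int) (direction : String) (out : Bool) : Prop := out = copy_column_alt grid x direction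
instance (grid : List (List String)) (x : Int) (direction : String) (out : Bool) : Decidable (Spec_copy_column grid x direction out) := by unfold Spec_copy_column; infer_instance

-- ===== CLAIM (what is proved, stated in full; the proofs are below) =====
def Claim_equal_copy_column : Prop := ∀ (grid : List (List String)) (x : Int) (direction : String), Dom_copy_column grid x direction → Pre_copy_column grid x direction → Spec_copy_column grid x direction (copy_column grid x direction)

-- ===== LEMMAS AND PROOFS =====

-- the dictionary only stores the steps 0, 1 and -1
theorem dirx_mem (direction : String) (d : Int)
    (h : PySem.Dict.get? DIRECTION_X direction = some d) : d = 0 ∨ d = 1 ∨ d = -1 := by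
  have e : DIRECTION_X = PySem.Dict.mk [("UP", (0:Int)), ("DOWN", 0), ("LEFT", -1), ("RIGHT", 1)] := by rfl
  rw [e] at h
  simp only [PySem.Dict.get?_mk_cons] at h
  split_ifs at h <;> simp_all [PySem.Dict.get?]

theorem can_go_cons (r0 : List String) (rest : List (List String)) (nx : Int) :
    can_go (r0 :: rest) nx 0 = decide (0 ≤ nx ∧ nx < (r0.length : Int)) := by
  simp only [can_go, PySem.List.pyGet?_zero_cons, List.length_cons]
  by_cases hc : 0 ≤ nx ∧ nx < (r0.length : Int)
  · rw [if_neg (by omega)]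
    exact (decide_eq_true hc).symm
  · rw [if_pos (by omega)]
    exact (decide_eq_false hc).symm

theorem cell0_cons (r0 : List String) (rest : List (List String)) (nx : Int) :
    cell0 (r0 :: rest) nx = PySem.List.pyGet? r0 nx := by
  simp [cell0]

-- (if b = false then false else true) = b, the shape of A's recursive call
theorem if_false_id (b : Bool) : (if b = false then false else true) = b := by cases b <;> rfl

theorem take_succ_reverse (l : List String) (n : Nat) (h : n < l.length) :
    (l.take (n + 1)).reverse = l[n] :: (l.take n).reverse := by
  rw [List.take_add_one]; simp [List.getElem?_eq_getElem h]

-- d = 1: A's recursion from x decides 'some known column in row0[x+1:]'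
theorem aux_right (r0 : List String) (rest : List (List String)) :
    ∀ (fuel : Nat) (x : Int), (x + 1 < 0 ∨ (r0.length : Int) ≤ x + 1 + fuel) →
      copy_column_aux (r0 :: rest) 1 fuel x =
        (if 0 ≤ x + 1 ∧ x + 1 < (r0.length : Int)
         then (r0.drop (x + 1).toNat).any (fun v => v != "?") else false) := by
  intro fuel
  induction fuel with
  | zero =>
    intro x H
    have hng : ¬ (0 ≤ x + 1 ∧ x + 1 < (r0.length : Int)) := by omega
    simp only [copy_column_aux]; rw [if_neg hng]
  | succ fuel ih =>
    intro x H
    simp only [copy_column_aux, can_go_cons, cell0_cons, decide_eq_true_eq]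
    by_cases hg : 0 ≤ x + 1 ∧ x + 1 < (r0.length : Int)
    · have hlt : (x + 1).toNat < r0.length := by omega
      have hget : PySem.List.pyGet? r0 (x + 1) = some r0[(x + 1).toNat] :=
        PySem.List.pyGet?_eq_some_getElem r0 hg.1 hg.2
      rw [if_pos hg, if_pos hg, hget, List.drop_eq_getElem_cons hlt]
      by_cases hq : r0[(x + 1).toNat] = "?"
      · rw [if_pos (show (some r0[(x + 1).toNat] : Option String) = some "?" by rw [hq]),
          if_false_id, ih (x + 1) (by omega), List.any_cons,
          show (r0[(x + 1).toNat] != "?") = false by simp [hq], Bool.false_or]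
        by_cases h2 : x + 1 + 1 < (r0.length : Int)
        · rw [if_pos (show 0 ≤ x + 1 + 1 ∧ x + 1 + 1 < (r0.length : Int) from ⟨by omega, h2⟩),
            show (x + 1 + 1).toNat = (x + 1).toNat + 1 by omega]
        · rw [if_neg (by omega), List.drop_eq_nil_of_le (by omega), List.any_nil]
      · rw [if_neg (show ¬ ((some r0[(x + 1).toNat] : Option String) = some "?") by simp [hq]),
          List.any_cons, show (r0[(x + 1).toNat] != "?") = true by simp [hq], Bool.true_or]
    · rw [if_neg hg, if_neg hg]

-- d = -1: A's recursion from x decides 'some known column in row0[x-1::-1]'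
theorem aux_left (r0 : List String) (rest : List (List String)) :
    ∀ (fuel : Nat) (x : Int), ((r0.length : Int) ≤ x + -1 ∨ x ≤ fuel) →
      copy_column_aux (r0 :: rest) (-1) fuel x =
        (if 0 ≤ x + -1 ∧ x + -1 < (r0.length : Int)
         then ((r0.take ((x + -1).toNat + 1)).reverse).any (fun v => v != "?") else false) := by
  intro fuel
  induction fuel with
  | zero =>
    intro x H
    have hng : ¬ (0 ≤ x + -1 ∧ x + -1 < (r0.length : Int)) := by omega
    simp only [copy_column_aux]; rw [if_neg hng]
  | succ fuel ih =>
    intro x H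
    simp only [copy_column_aux, can_go_cons, cell0_cons, decide_eq_true_eq]
    by_cases hg : 0 ≤ x + -1 ∧ x + -1 < (r0.length : Int)
    · have hlt : (x + -1).toNat < r0.length := by omega
      have hget : PySem.List.pyGet? r0 (x + -1) = some r0[(x + -1).toNat] :=
        PySem.List.pyGet?_eq_some_getElem r0 hg.1 hg.2
      rw [if_pos hg, if_pos hg, hget, take_succ_reverse r0 _ hlt]
      by_cases hq : r0[(x + -1).toNat] = "?"
      · rw [if_pos (show (some r0[(x + -1).toNat] : Option String) = some "?" by rw [hq]),
          if_false_id, ih (x + -1) (by omega), List.any_cons,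
          show (r0[(x + -1).toNat] != "?") = false by simp [hq], Bool.false_or]
        by_cases h2 : 0 ≤ x + -1 + -1
        · rw [if_pos (show 0 ≤ x + -1 + -1 ∧ x + -1 + -1 < (r0.length : Int) from ⟨h2, by omega⟩),
            show (x + -1 + -1).toNat + 1 = (x + -1).toNat by omega]
        · rw [if_neg (by omega), show (x + -1).toNat = 0 by omega, List.take_zero,
            List.reverse_nil, List.any_nil]
      · rw [if_neg (show ¬ ((some r0[(x + -1).toNat] : Option String) = some "?") by simp [hq]),
          List.any_cons, show (r0[(x + -1).toNat] != "?") = true by simp [hq], Bool.true_or]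
    · rw [if_neg hg, if_neg hg]

-- d = 0: on an in-range '?' cell A's recursion never terminates (fuel runs out: False)
theorem aux_stay_q (r0 : List String) (rest : List (List String)) (x : Int)
    (hq : PySem.List.pyGet? r0 x = some "?") :
    ∀ fuel, copy_column_aux (r0 :: rest) 0 fuel x = false := by
  intro fuel
  induction fuel with
  | zero => rfl
  | succ fuel ih =>
    simp only [copy_column_aux, can_go_cons, cell0_cons, add_zero, hq, ih]
    simp

-- d = 0: A's recursion decides 'row0[x] is known' (given at least one unit of fuel)
theorem aux_stay (r0 : List String) (rest : List (List String)) (fuel : Nat) (x : Int) :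
    copy_column_aux (r0 :: rest) 0 (fuel + 1) x =
      (if 0 ≤ x ∧ x < (r0.length : Int)
       then ((r0.drop x.toNat).take 1).any (fun v => v != "?") else false) := by
  simp only [copy_column_aux, can_go_cons, cell0_cons, add_zero, decide_eq_true_eq]
  by_cases hg : 0 ≤ x ∧ x < (r0.length : Int)
  · have hlt : x.toNat < r0.length := by omega
    have hget : PySem.List.pyGet? r0 x = some r0[x.toNat] :=
      PySem.List.pyGet?_eq_some_getElem r0 hg.1 hg.2
    have hseg : (r0.drop x.toNat).take 1 = [r0[x.toNat]] := by
      rw [List.drop_eq_getElem_cons hlt]; rfl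
    rw [if_pos hg, if_pos hg, hget, hseg]
    by_cases hq : r0[x.toNat] = "?"
    · rw [if_pos (show (some r0[x.toNat] : Option String) = some "?" by rw [hq]), if_false_id,
        aux_stay_q r0 rest x (by rw [hget, hq]) fuel, List.any_cons, List.any_nil,
        show (r0[x.toNat] != "?") = false by simp [hq], Bool.false_or]
    · rw [if_neg (show ¬ ((some r0[x.toNat] : Option String) = some "?") by simp [hq]),
        List.any_cons, List.any_nil, show (r0[x.toNat] != "?") = true by simp [hq], Bool.true_or]
  · rw [if_neg hg, if_neg hg]

theorem ports_agree (grid : List (List String)) (x : Int) (direction : String) :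
    copy_column grid x direction = copy_column_alt grid x direction := by
  cases grid with
  | nil =>
    simp only [copy_column, copy_column_alt]
    cases h : PySem.Dict.get? DIRECTION_X direction with
    | none => rfl
    | some d =>
      dsimp only
      have hcg : can_go ([] : List (List String)) (x + d) 0 = false := by
        simp [can_go]
      simp [copy_column_aux, hcg]
  | cons r0 rest =>
    simp only [copy_column, copy_column_alt, PySem.List.pyGet?_zero_cons, Option.getD_some,
      List.headD_cons]
    cases h : PySem.Dict.get? DIRECTION_X direction with
    | none => rfl
    | some d =>
      dsimp only
      rcases dirx_mem direction d h with h0 | h1 | hm1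
      · subst h0
        simp only [add_zero]
        rw [aux_stay r0 rest r0.length x,
          if_neg (show ¬ ((0:Int) > 0) by norm_num), if_neg (show ¬ ((0:Int) < 0) by norm_num)]
        by_cases hg : 0 ≤ x ∧ x < (r0.length : Int)
        · rw [if_pos hg, if_pos hg, ← List.findIdx?_isSome]
          cases List.findIdx? (fun v => v != "?") ((r0.drop x.toNat).take 1) <;> rfl
        · rw [if_neg hg, if_neg hg]
      · subst h1
        rw [aux_right r0 rest (r0.length + 1) x (by omega),
          if_pos (show (1:Int) > 0 by norm_num)]
        by_cases hg : 0 ≤ x + 1 ∧ x + 1 < (r0.length : Int)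
        · rw [if_pos hg, if_pos hg, ← List.findIdx?_isSome]
          cases List.findIdx? (fun v => v != "?") (r0.drop (x + 1).toNat) <;> rfl
        · rw [if_neg hg, if_neg hg]
      · subst hm1
        rw [aux_left r0 rest (r0.length + 1) x (by omega),
          if_neg (show ¬ ((-1:Int) > 0) by norm_num), if_pos (show (-1:Int) < 0 by norm_num)]
        by_cases hg : 0 ≤ x + -1 ∧ x + -1 < (r0.length : Int)
        · rw [if_pos hg, if_pos hg, ← List.findIdx?_isSome]
          cases List.findIdx? (fun v => v != "?") ((r0.take ((x + -1).toNat + 1)).reverse) <;> rfl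
        · rw [if_neg hg, if_neg hg]

-- ===== VERDICT (by name: the statement is the Claim_ definition above) =====
theorem copy_column_spec : Claim_equal_copy_column := by
  intro grid x direction _ _
  exact ports_agree grid x direction
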